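-- pv_equiv track=rewrite | github.com/bthornemail/atomic-kernel-v1 | dev-docs/algorithmic_clock (1).py | edge_count
-- ===== SOURCE A (Python) =====
-- MASK  = 0xFFFF   # 65535 — all states must be AND'd with this
--
-- def edge_count(x):
--     """
--     Texture class: number of bit transitions around the 16-bit ring.
--     Measures spectral roughness of the state.
--     """
--     x = x & MASK
--     count = 0
--     for i in range(16):
--         bit_i = (x >> i) & 1
--         bit_j = (x >> ((i + 1) % 16)) & 1
--         if bit_i != bit_j:
--             count += 1
--     return count
-- ===== SOURCE B (Python) =====
-- MASK = 0xFFFF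
--
--
-- def edge_count(x):
--     """
--     Texture class: number of bit transitions around the 16-bit ring.
--     Rotate the masked state one step around the ring and popcount the XOR.
--     """
--     x = x & MASK
--     ror = (x >> 1) | ((x & 1) << 15)
--     return bin(x ^ ror).count('1')
-- ===== Notes on version B (the rewrite author's own statement) =====
-- stated objective: idiomatic
-- what changed: Replaces the per-bit loop over the ring positions with a branch-free one-step ring rotation XORed with the value, returning the popcount of the XOR.
import Mathlib
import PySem

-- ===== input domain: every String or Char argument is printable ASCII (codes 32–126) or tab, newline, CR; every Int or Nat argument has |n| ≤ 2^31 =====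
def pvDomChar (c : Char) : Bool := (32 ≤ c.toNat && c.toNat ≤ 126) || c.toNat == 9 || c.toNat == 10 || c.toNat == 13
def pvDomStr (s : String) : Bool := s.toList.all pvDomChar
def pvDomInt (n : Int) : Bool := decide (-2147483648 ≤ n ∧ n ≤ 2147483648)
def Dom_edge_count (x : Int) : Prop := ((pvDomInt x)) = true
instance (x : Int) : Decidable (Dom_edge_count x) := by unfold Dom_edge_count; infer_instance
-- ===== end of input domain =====

-- B replaces A's per-bit loop over the ring positions by a branch-free one-step ring rotation
-- XORed with the masked value, returning the popcount of the XOR (same value, different algorithm).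

-- ===== PORT A =====
-- literal port of A: mask, then loop i = 0..15 comparing bit i with bit (i+1) % 16
def edge_count (x : Int) : Int :=
  let x := PySem.Int.band x 65535
  (List.range 16).foldl (fun (count : Int) (i : Nat) =>
    let bit_i := PySem.Int.band (x >>> i) 1
    let bit_j := PySem.Int.band (x >>> ((i + 1) % 16)) 1
    if bit_i ≠ bit_j then count + 1 else count) 0

-- ===== PORT B =====
-- literal port of Source B: mask, rotate right one step around the 16-bit ring, popcount the XOR
-- (Python's int.bit_count() on the nonnegative XOR is PySem.Int.bitCount, exact here)
def edge_count_alt (x : Int) : Int :=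
  let x := PySem.Int.band x 65535
  let ror := PySem.Int.bor (x >>> (1 : Nat)) ((PySem.Int.band x 1) <<< (15 : Nat))
  ((PySem.Int.bitCount (PySem.Int.bxor x ror) : Nat) : Int)

-- ===== PRECONDITION & SPEC =====
def Spec_edge_count (x : Int) (out : Int) : Prop := out = edge_count_alt x
instance (x : Int) (out : Int) : Decidable (Spec_edge_count x out) := by unfold Spec_edge_count; infer_instance

-- ===== CLAIM (what is proved, stated in full; the proofs are below) =====
def Claim_equal_edge_count : Prop := ∀ (x : Int), Dom_edge_count x → Spec_edge_count x (edge_count x)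

-- ===== LEMMAS AND PROOFS =====

-- the masked state is a 16-bit value
theorem pvMaskBounds (x : Int) : 0 ≤ PySem.Int.band x 65535 ∧ PySem.Int.band x 65535 < 65536 := by
  unfold PySem.Int.band
  split_ifs with h1 h2 h2 <;> try norm_num at h2
  · have h := @Nat.and_le_right x.toNat 65535
    constructor
    · exact Int.natCast_nonneg _
    · push_cast; omega
  · have h := @Nat.and_le_right (65535 : Nat) (-x - 1).toNat
    constructor
    · exact Int.natCast_nonneg _
    · push_cast; omega

-- Python's bit_count of a k-bit value is the sum of its bits
theorem pvBitCountSum : ∀ (k m : Nat), m < 2 ^ k →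
    PySem.Int.bitCount (m : Int) = ∑ i ∈ Finset.range k, (if m.testBit i then 1 else 0) := by
  intro k
  induction k with
  | zero =>
    intro m hm
    interval_cases m
    simp [PySem.Int.bitCount_zero]
  | succ k ih =>
    intro m hm
    rcases Nat.eq_zero_or_pos m with h0 | h0
    · subst h0; simp [PySem.Int.bitCount_zero, Nat.zero_testBit]
    · rw [PySem.Int.bitCount_natCast h0, Finset.sum_range_succ',
        ih (m / 2) (by rw [pow_succ] at hm; omega)]
      have hf : ∀ i, (if m.testBit (i + 1) then (1 : Nat) else 0) = if (m / 2).testBit i then 1 else 0 := by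
        intro i; rw [Nat.testBit_succ]
      have h0' : (if m.testBit 0 then (1 : Nat) else 0) = m % 2 := by
        rw [Nat.testBit_zero]
        rcases Nat.mod_two_eq_zero_or_one m with h | h <;> simp [h]
      simp only [hf, h0']
      omega

-- counting loop as a sum of indicator bits
theorem pvFoldlCount (g : Nat → Bool) : ∀ (k : Nat) (a : Int),
    List.foldl (fun c i => if g i then c + 1 else c) a (List.range k)
      = a + ((∑ i ∈ Finset.range k, (if g i then 1 else 0) : Nat) : Int) := by
  intro k
  induction k with
  | zero => intro a; simp
  | succ k ih =>
    intro a
    rw [List.range_succ, List.foldl_append, ih, Finset.sum_range_succ]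
    by_cases hg : g k <;> simp [hg] <;> omega

-- the bit of the testBit form: n.testBit j as the parity of n >>> j
theorem pvTestBitMod (n j : Nat) : n.testBit j = decide ((n >>> j) % 2 = 1) := by
  simp [Nat.testBit, Nat.one_and_eq_mod_two]

-- adjacent ring bits differ exactly where the XOR with the one-step rotation has a set bit
theorem pvPointwise (n i : Nat) (hn : n < 65536) (hi : i < 16) :
    ((PySem.Int.band ((n : Int) >>> i) 1 ≠ PySem.Int.band ((n : Int) >>> ((i + 1) % 16)) 1)) ↔
      ((n ^^^ ((n >>> 1) ||| ((n &&& 1) <<< 15))).testBit i = true) := by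
  have cast : ∀ j : Nat, PySem.Int.band ((n : Int) >>> j) 1 = (((n >>> j) &&& 1 : Nat) : Int) := by
    intro j
    rw [← Int.natCast_shiftRight]
    simpa using PySem.Int.band_natCast (n >>> j) 1
  rw [cast i, cast ((i + 1) % 16), Ne, Int.natCast_inj]
  simp only [Nat.testBit_xor, Nat.testBit_or, Nat.testBit_shiftRight, Nat.testBit_shiftLeft,
    Nat.and_one_is_mod]
  by_cases h15 : i = 15
  · subst h15
    have e16 : n.testBit 16 = false := Nat.testBit_lt_two_pow (by omega)
    have e0 : (n % 2).testBit 0 = n.testBit 0 := by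
      rw [pvTestBitMod, pvTestBitMod]; simp
    simp only [show (15 + 1) % 16 = 0 from rfl, show 1 + 15 = 16 from rfl, e16,
      show decide (15 ≥ 15) = true from rfl, e0, Bool.false_or, Bool.true_and, pvTestBitMod]
    rcases Nat.mod_two_eq_zero_or_one (n >>> 15) with h | h <;>
      rcases Nat.mod_two_eq_zero_or_one (n >>> 0) with h' | h' <;>
        simp only [Nat.shiftRight_zero] at h' <;> simp [h, h']
  · have hmod : (i + 1) % 16 = i + 1 := Nat.mod_eq_of_lt (by omega)
    simp only [hmod, show ¬(i ≥ 15) from by omega, decide_false, Bool.false_and, Bool.or_false,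
      show 1 + i = i + 1 from by omega, pvTestBitMod]
    rcases Nat.mod_two_eq_zero_or_one (n >>> i) with h | h <;>
      rcases Nat.mod_two_eq_zero_or_one (n >>> (i + 1)) with h' | h' <;>
        simp [h, h']

-- ===== VERDICT (by name: the statement is the Claim_ definition above) =====
set_option maxHeartbeats 1000000 in
theorem edge_count_spec : Claim_equal_edge_count := by
  intro x _
  unfold Spec_edge_count
  obtain ⟨h0, h1⟩ := pvMaskBounds x
  set n : Nat := (PySem.Int.band x 65535).toNat with hndef
  have hxn : PySem.Int.band x 65535 = ((n : Nat) : Int) := (Int.toNat_of_nonneg h0).symm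
  have hn : n < 65536 := by omega
  -- the rotated ring value, over Nat
  set r : Nat := (n >>> 1) ||| ((n &&& 1) <<< 15) with hrdef
  have hr : r < 65536 := by
    have h2 : n >>> 1 < 65536 := by rw [Nat.shiftRight_eq_div_pow]; omega
    have h3 : (n &&& 1) <<< 15 < 65536 := by
      have := Nat.and_one_is_mod n
      rw [Nat.shiftLeft_eq, this]; omega
    have := @Nat.or_lt_two_pow (n >>> 1) ((n &&& 1) <<< 15) 16 (by omega) (by omega)
    omega
  have hxr : n ^^^ r < 2 ^ 16 := Nat.xor_lt_two_pow (by omega) (by omega)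
  -- rewrite both ports in terms of n
  simp only [edge_count, edge_count_alt, hxn]
  -- B side: push casts inward so everything is a Nat computation
  have e1 : ((n : Int)) >>> (1 : Nat) = ((n >>> 1 : Nat) : Int) := (Int.natCast_shiftRight n 1).symm
  have e2 : PySem.Int.band (n : Int) 1 = ((n &&& 1 : Nat) : Int) := by
    simpa using PySem.Int.band_natCast n 1
  have e3 : ((n &&& 1 : Nat) : Int) <<< (15 : Nat) = (((n &&& 1) <<< 15 : Nat) : Int) :=
    (Int.natCast_shiftLeft _ 15).symm
  have e4 : PySem.Int.bor ((n >>> 1 : Nat) : Int) (((n &&& 1) <<< 15 : Nat) : Int) = ((r : Nat) : Int) := by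
    simpa [hrdef] using PySem.Int.bor_natCast (n >>> 1) ((n &&& 1) <<< 15)
  have e5 : PySem.Int.bxor ((n : Nat) : Int) ((r : Nat) : Int) = ((n ^^^ r : Nat) : Int) := by
    simpa using PySem.Int.bxor_natCast n r
  rw [e1, e2, e3, e4, e5, pvBitCountSum 16 (n ^^^ r) hxr]
  -- A side: replace the per-bit comparison by the bit of the XOR, then count
  rw [PySem.List.foldl_congr_mem (List.range 16) _
      (fun c i => if (n ^^^ r).testBit i then c + 1 else c) 0
      (by
        intro acc i hi
        have hi16 : i < 16 := by simpa using hi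
        exact if_congr (pvPointwise n i hn hi16) rfl rfl)]
  rw [pvFoldlCount]
  simp
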